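-- pv_equiv track=rewrite | github.com/Nakky123/Python---Algorithms | Section 2/Exam/Q12.py | max_gold_coins
-- ===== SOURCE A (Python) =====
-- def max_gold_coins(N):
--     coins = [0] * (N + 1)
--     coins[1] = 1
--     for i in range(2, N + 1):
--         if i % 2 == 0:
--             coins[i] = coins[i // 2]
--         else:
--             coins[i] = coins[i // 2] + coins[(i // 2) + 1]
--     return max(coins) , coins
-- ===== SOURCE B (Python) =====
-- def _fusc(i):
--     # Stern's diatomic value fusc(i), computed from the bits of i:
--     # invariant (a, b) = (fusc(remaining)+..) pair update per low bit.
--     a, b = 1, 0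
--     while i > 0:
--         if i % 2:
--             b += a
--         else:
--             a += b
--         i //= 2
--     return b
--
--
-- def max_gold_coins(N):
--     coins = [_fusc(i) for i in range(N + 1)]
--     return max(coins), coins
-- ===== Notes on version B (the rewrite author's own statement) =====
-- stated objective: alternative
-- what changed: Replaces A's in-place dynamic-programming array fill (each entry read back from the table) with a table-free computation: each value is Stern's fusc(i), computed independently by an iterative pair update over the binary digits of i, and the list is built by a comprehension.
import Mathlib
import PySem

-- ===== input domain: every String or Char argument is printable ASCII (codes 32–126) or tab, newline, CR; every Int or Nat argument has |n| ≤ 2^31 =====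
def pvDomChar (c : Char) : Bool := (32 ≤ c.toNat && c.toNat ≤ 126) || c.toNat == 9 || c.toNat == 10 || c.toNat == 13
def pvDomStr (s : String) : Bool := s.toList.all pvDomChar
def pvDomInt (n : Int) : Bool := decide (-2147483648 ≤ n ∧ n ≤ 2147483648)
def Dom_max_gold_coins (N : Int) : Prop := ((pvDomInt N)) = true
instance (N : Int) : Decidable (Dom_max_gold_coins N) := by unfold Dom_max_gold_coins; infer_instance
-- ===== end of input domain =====

-- B replaces A's mutated DP array with a table-free per-index bit-iteration of Stern's fusc value;
-- the equivalence below is about the return value (A mutates only its own local list).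

-- ===== PORT A =====
def maxGoldBody (c : List Int) (i : Int) : List Int :=
  if PySem.Int.mod i 2 == 0 then
    PySem.List.pySetD c i (PySem.List.pyGetD c (PySem.Int.floordiv i 2) 0)
  else
    PySem.List.pySetD c i
      (PySem.List.pyGetD c (PySem.Int.floordiv i 2) 0 +
       PySem.List.pyGetD c (PySem.Int.floordiv i 2 + 1) 0)

def max_gold_coins (N : Int) : Int × List Int :=
  let coins := List.replicate (N + 1).toNat (0 : Int)
  let coins := PySem.List.pySetD coins 1 1
  let coins := (PySem.List.pyRange 2 (N + 1) 1).foldl maxGoldBody coins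
  ((PySem.List.max? coins (fun x => x)).getD 0, coins)

-- ===== PORT B =====
def fuscLoop (i a b : Int) : Int :=
  if 0 < i then
    if PySem.Int.mod i 2 ≠ 0 then fuscLoop (PySem.Int.floordiv i 2) a (b + a)
    else fuscLoop (PySem.Int.floordiv i 2) (a + b) b
  else b
termination_by i.toNat
decreasing_by
  · simp only [PySem.Int.floordiv_eq_ediv_of_pos (by omega : (0:Int) < 2)]
    omega
  · simp only [PySem.Int.floordiv_eq_ediv_of_pos (by omega : (0:Int) < 2)]
    omega

def max_gold_coins_alt (N : Int) : Int × List Int :=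
  let coins := (PySem.List.pyRange 0 (N + 1) 1).map (fun i => fuscLoop i 1 0)
  ((PySem.List.max? coins (fun x => x)).getD 0, coins)

-- ===== PRECONDITION & SPEC =====
-- A raises IndexError for N < 1 ([0]*(N+1) has no index 1); Pre_ admits exactly N ≥ 1.
def Pre_max_gold_coins (N : Int) : Prop := 1 ≤ N
instance (N : Int) : Decidable (Pre_max_gold_coins N) := by unfold Pre_max_gold_coins; infer_instance
def pvWitness_max_gold_coins : Int := 5

def Spec_max_gold_coins (N : Int) (out : Int × List Int) : Prop := out = max_gold_coins_alt N
instance (N : Int) (out : Int × List Int) : Decidable (Spec_max_gold_coins N out) := by unfold Spec_max_gold_coins; infer_instance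

-- ===== CLAIM (what is proved, stated in full; the proofs are below) =====
def Claim_equal_max_gold_coins : Prop := ∀ (N : Int), Dom_max_gold_coins N → Pre_max_gold_coins N → Spec_max_gold_coins N (max_gold_coins N)

-- ===== LEMMAS AND PROOFS =====

-- pure specification of Stern's fusc recurrence (proof helper only)
def fuscSpec (i : Int) : Int :=
  if _h : i ≤ 1 then i
  else
    let hh := PySem.Int.floordiv i 2
    if PySem.Int.mod i 2 == 0 then fuscSpec hh
    else fuscSpec hh + fuscSpec (hh + 1)
termination_by i.toNat
decreasing_by
  · simp only [PySem.Int.floordiv_eq_ediv_of_pos (by omega : (0:Int) < 2)]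
    omega
  · simp only [PySem.Int.floordiv_eq_ediv_of_pos (by omega : (0:Int) < 2)]
    omega
  · rename_i hodd
    simp only [beq_iff_eq] at hodd
    rw [PySem.Int.mod_eq_emod_of_pos (by omega : (0:Int) < 2)] at hodd
    simp only [PySem.Int.floordiv_eq_ediv_of_pos (by omega : (0:Int) < 2)]
    omega


-- the intended table: entry k is fusc k
def specList (m : Nat) : List Int := (List.range m).map (fun k => fuscSpec (Int.ofNat k))

lemma specList_length (m : Nat) : (specList m).length = m := by
  simp [specList]

lemma fuscSpec_zero : fuscSpec 0 = 0 := by rw [fuscSpec]; norm_num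

lemma fuscSpec_one : fuscSpec 1 = 1 := by rw [fuscSpec]; norm_num

lemma specList_getD (m k : Nat) (t : List Int) (hk : k < m) :
    PySem.List.pyGetD (specList m ++ t) (k : Int) 0 = fuscSpec (k : Int) := by
  rw [PySem.List.pyGetD_of_nonneg _ _ (Int.natCast_nonneg k)]
  simp only [Int.toNat_natCast]
  rw [List.getD_eq_getElem _ _ (by simp [specList_length]; omega)]
  rw [List.getElem_append_left (by simp [specList_length]; omega)]
  simp only [specList]
  rw [List.getElem_map, List.getElem_range]
  rfl

lemma loop_invariant (n : Nat) (hn : 1 ≤ n) :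
    ∀ j : Nat, 2 ≤ j → j ≤ n + 1 →
      (PySem.List.pyRange 2 (j : Int) 1).foldl maxGoldBody
          (PySem.List.pySetD (List.replicate (n+1) (0:Int)) 1 1)
        = specList j ++ List.replicate (n + 1 - j) 0 := by
  intro j
  induction j with
  | zero => omega
  | succ j ih =>
    intro h2 hle
    by_cases hj : j < 2
    · -- j + 1 = 2 : base case
      have hj2 : j = 1 := by omega
      subst hj2
      rw [show (((1:Nat)+1 : Nat) : Int) = 2 by norm_num, PySem.List.pyRange_one_eq_nil (by norm_num)]
      simp only [List.foldl_nil]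
      obtain ⟨m, rfl⟩ : ∃ m, n = m + 1 := ⟨n - 1, by omega⟩
      rw [PySem.List.pySetD_of_nonneg _ _ (by norm_num : (0:Int) ≤ 1)]
      simp [specList, List.range_succ, List.replicate_succ, fuscSpec_zero, fuscSpec_one]
    · -- step
      have h2j : 2 ≤ j := by omega
      rw [show (((j:Nat)+1 : Nat) : Int) = (j : Int) + 1 by push_cast; ring,
          PySem.List.pyRange_one_succ_right (by exact_mod_cast h2j),
          List.foldl_append]
      rw [ih h2j (by omega)]
      simp only [List.foldl_cons, List.foldl_nil]
      unfold maxGoldBody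
      have hnotle : ¬ ((j : Int) ≤ 1) := by exact_mod_cast (by omega : ¬ ((j:Int) ≤ 1))
      have hfd : PySem.Int.floordiv (j : Int) 2 = ((j / 2 : Nat) : Int) := by
        exact_mod_cast PySem.Int.floordiv_natCast j 2
      have hmd : PySem.Int.mod (j : Int) 2 = ((j % 2 : Nat) : Int) := by
        exact_mod_cast PySem.Int.mod_natCast j 2
      have hset : ∀ v : Int,
          PySem.List.pySetD (specList j ++ List.replicate (n + 1 - j) 0) (j : Int) v
            = specList j ++ v :: List.replicate (n - j) 0 := by
        intro v
        rw [PySem.List.pySetD_of_nonneg _ _ (Int.natCast_nonneg j)]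
        simp only [Int.toNat_natCast]
        rw [List.set_append_right _ _ (by simp [specList_length])]
        simp only [specList_length, Nat.sub_self]
        obtain ⟨m, hm⟩ : ∃ m, n + 1 - j = m + 1 := ⟨n - j, by omega⟩
        rw [hm, List.replicate_succ]
        simp
        omega
      have hspec : specList (j + 1) = specList j ++ [fuscSpec (j : Int)] := by
        simp [specList, List.range_succ]
      have hfj : fuscSpec (j : Int) =
          if (j % 2 : Nat) = 0 then fuscSpec ((j / 2 : Nat) : Int)
          else fuscSpec ((j / 2 : Nat) : Int) + fuscSpec (((j / 2 : Nat) : Int) + 1) := by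
        rw [fuscSpec, dif_neg hnotle]
        simp only [hfd, hmd, beq_iff_eq, Nat.cast_eq_zero]
      have hsub : n + 1 - (j + 1) = n - j := by omega
      by_cases hp : (j % 2 : Nat) = 0
      · have hc : (PySem.Int.mod (j : Int) 2 == 0) = true := by
          rw [hmd]; simp [hp]
        rw [if_pos hc, hfd,
            specList_getD j (j/2) _ (by omega), hset, hspec, hfj, if_pos hp, hsub]
        simp [List.append_assoc]
      · have hc : ¬ ((PySem.Int.mod (j : Int) 2 == 0) = true) := by
          rw [hmd]; simp only [beq_iff_eq, Nat.cast_eq_zero]; omega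
        have hcast : ((j / 2 : Nat) : Int) + 1 = (((j / 2 + 1) : Nat) : Int) := by push_cast; ring
        rw [if_neg hc, hfd,
            specList_getD j (j/2) _ (by omega), hcast,
            specList_getD j (j/2 + 1) _ (by omega), hset, hspec, hfj, if_neg hp, hsub]
        simp [List.append_assoc]

lemma coins_eq (n : Nat) (hn : 1 ≤ n) :
    (PySem.List.pyRange 2 ((n : Int) + 1) 1).foldl maxGoldBody
        (PySem.List.pySetD (List.replicate (n+1) (0:Int)) 1 1)
      = specList (n + 1) := by
  have h1 : ((n : Int) + 1) = ((n + 1 : Nat) : Int) := by push_cast; ring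
  rw [h1, loop_invariant n hn (n+1) (by omega) (le_refl _)]
  simp only [Nat.sub_self, List.replicate_zero, List.append_nil]

lemma fuscLoop_eq (n : Nat) : ∀ a b : Int,
    fuscLoop (n : Int) a b = a * fuscSpec (n : Int) + b * fuscSpec ((n : Int) + 1) := by
  induction n using Nat.strong_induction_on with
  | _ n ih =>
    intro a b
    match n with
    | 0 =>
      rw [fuscLoop]
      norm_num [fuscSpec_zero, fuscSpec_one]
    | 1 =>
      rw [fuscLoop]
      norm_num [PySem.Int.mod_eq_emod_of_pos (by omega : (0:Int) < 2),
        PySem.Int.floordiv_eq_ediv_of_pos (by omega : (0:Int) < 2)]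
      rw [fuscLoop]
      norm_num [fuscSpec_zero, fuscSpec_one]
      have h2 : fuscSpec 2 = fuscSpec 1 := by
        rw [fuscSpec]
        norm_num [PySem.Int.mod_eq_emod_of_pos (by omega : (0:Int) < 2),
          PySem.Int.floordiv_eq_ediv_of_pos (by omega : (0:Int) < 2)]
      rw [h2, fuscSpec_one]
      ring
    | (m + 2) =>
      have hpos : (0:Int) < ((m + 2 : Nat) : Int) := by push_cast; omega
      have hfd : PySem.Int.floordiv (((m+2 : Nat)) : Int) 2 = (((m+2) / 2 : Nat) : Int) := by
        exact_mod_cast PySem.Int.floordiv_natCast (m+2) 2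
      have hmd : PySem.Int.mod (((m+2 : Nat)) : Int) 2 = (((m+2) % 2 : Nat) : Int) := by
        exact_mod_cast PySem.Int.mod_natCast (m+2) 2
      have hnotle : ¬ (((m+2 : Nat) : Int) ≤ 1) := by push_cast; omega
      have hrec : fuscSpec ((m+2 : Nat) : Int) =
          if ((m+2) % 2 : Nat) = 0 then fuscSpec (((m+2)/2 : Nat) : Int)
          else fuscSpec (((m+2)/2 : Nat) : Int) + fuscSpec ((((m+2)/2 : Nat) : Int) + 1) := by
        rw [fuscSpec, dif_neg hnotle]
        simp only [hfd, hmd, beq_iff_eq, Nat.cast_eq_zero]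
      by_cases hp : ((m+2) % 2 : Nat) = 0
      · -- even
        have hc : ¬ (PySem.Int.mod ((m+2 : Nat) : Int) 2 ≠ 0) := by
          rw [hmd]; simp [hp]
        rw [fuscLoop, if_pos hpos, if_neg hc, hfd,
            ih ((m+2)/2) (by omega) (a + b) b]
        have hsucc : fuscSpec (((m+2 : Nat) : Int) + 1) =
            fuscSpec (((m+2)/2 : Nat) : Int) + fuscSpec ((((m+2)/2 : Nat) : Int) + 1) := by
          have hco : (((m+2 : Nat)) : Int) + 1 = ((m+3 : Nat) : Int) := by push_cast; ring
          have hfd3 : PySem.Int.floordiv (((m+3 : Nat)) : Int) 2 = (((m+3) / 2 : Nat) : Int) := by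
            exact_mod_cast PySem.Int.floordiv_natCast (m+3) 2
          have hmd3 : PySem.Int.mod (((m+3 : Nat)) : Int) 2 = (((m+3) % 2 : Nat) : Int) := by
            exact_mod_cast PySem.Int.mod_natCast (m+3) 2
          have h3odd : ((m+3) % 2 : Nat) ≠ 0 := by omega
          rw [hco, fuscSpec, dif_neg (by push_cast; omega : ¬ (((m+3 : Nat) : Int) ≤ 1))]
          simp only [hfd3, hmd3, beq_iff_eq, Nat.cast_eq_zero, if_neg h3odd]
          have e1 : (m+3)/2 = (m+2)/2 := by omega
          rw [e1]
        rw [hrec, if_pos hp, hsucc]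
        ring
      · -- odd
        have hc : (PySem.Int.mod ((m+2 : Nat) : Int) 2 ≠ 0) := by
          rw [hmd]; simp only [ne_eq, Nat.cast_eq_zero]; omega
        rw [fuscLoop, if_pos hpos, if_pos hc, hfd,
            ih ((m+2)/2) (by omega) a (b + a)]
        have hsucc : fuscSpec (((m+2 : Nat) : Int) + 1) = fuscSpec ((((m+2)/2 + 1) : Nat) : Int) := by
          have hco : (((m+2 : Nat)) : Int) + 1 = ((m+3 : Nat) : Int) := by push_cast; ring
          have hfd3 : PySem.Int.floordiv (((m+3 : Nat)) : Int) 2 = (((m+3) / 2 : Nat) : Int) := by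
            exact_mod_cast PySem.Int.floordiv_natCast (m+3) 2
          have hmd3 : PySem.Int.mod (((m+3 : Nat)) : Int) 2 = (((m+3) % 2 : Nat) : Int) := by
            exact_mod_cast PySem.Int.mod_natCast (m+3) 2
          have h3ev : ((m+3) % 2 : Nat) = 0 := by omega
          rw [hco, fuscSpec, dif_neg (by push_cast; omega : ¬ (((m+3 : Nat) : Int) ≤ 1))]
          simp only [hfd3, hmd3, beq_iff_eq, Nat.cast_eq_zero, if_pos h3ev]
          have e1 : (m+3)/2 = (m+2)/2 + 1 := by omega
          rw [e1]
        have hcast : ((((m+2)/2 : Nat)) : Int) + 1 = ((((m+2)/2 + 1) : Nat) : Int) := by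
          push_cast; ring
        rw [hrec, if_neg hp, hsucc, hcast]
        ring

lemma coins_alt_eq (n : Nat) :
    (PySem.List.pyRange 0 ((n : Int) + 1) 1).map (fun i => fuscLoop i 1 0)
      = specList (n + 1) := by
  have h1 : ((n : Int) + 1) = ((n + 1 : Nat) : Int) := by push_cast; ring
  rw [h1, PySem.List.pyRange_zero_natCast (n+1), List.map_map]
  apply List.map_congr_left
  intro k _
  show fuscLoop ((k : Nat) : Int) 1 0 = fuscSpec (Int.ofNat k)
  rw [fuscLoop_eq k 1 0]
  simp only [one_mul, zero_mul, add_zero]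
  rfl

-- ===== VERDICT (by name: the statement is the Claim_ definition above) =====
theorem max_gold_coins_spec : Claim_equal_max_gold_coins := by
  intro N _ hpre
  unfold Spec_max_gold_coins max_gold_coins max_gold_coins_alt
  unfold Pre_max_gold_coins at hpre
  obtain ⟨n, hn1, rfl⟩ : ∃ n : Nat, 1 ≤ n ∧ N = (n : Int) :=
    ⟨N.toNat, by omega, by omega⟩
  have hrepl : ((n : Int) + 1).toNat = n + 1 := by omega
  simp only [hrepl, coins_eq n hn1, coins_alt_eq n]
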